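-- pv_equiv track=rewrite | github.com/gusbarr0s/Mapeamento-Memoria-Cache---Performance-em-Sist.Ciber | semcomentario.py | mru
-- ===== SOURCE A (Python) =====
-- quadros = 8
--
-- def mru(paginas):
--     memoria = []
--     uso = []
--     faltas = 0
--     for p in paginas:
--         if p in memoria:
--             uso.remove(p)
--             uso.append(p)
--         else:
--             faltas += 1
--             if len(memoria) < quadros:
--                 memoria.append(p)
--             else:
--                 mru_pag = uso.pop()
--                 pos = memoria.index(mru_pag)
--                 memoria[pos] = p
--             uso.append(p)
--     return memoria, faltas
-- ===== SOURCE B (Python) =====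
-- quadros = 8
--
-- def mru(paginas):
--     # The MRU page is always simply the page accessed on the previous step,
--     # so track just that one value instead of a full recency stack.
--     memoria = []
--     faltas = 0
--     last = None
--     for p in paginas:
--         if p not in memoria:
--             faltas += 1
--             if len(memoria) < quadros:
--                 memoria.append(p)
--             else:
--                 memoria[memoria.index(last)] = p
--         last = p
--     return memoria, faltas
-- ===== Notes on version B (the rewrite author's own statement) =====
-- stated objective: simpler
-- what changed: Drops the recency stack `uso` entirely: since the most-recently-used page is always just the previously accessed page, B keeps a single `last` variable and replaces the frame holding `last` on a miss with full memory.
import Mathlib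
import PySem

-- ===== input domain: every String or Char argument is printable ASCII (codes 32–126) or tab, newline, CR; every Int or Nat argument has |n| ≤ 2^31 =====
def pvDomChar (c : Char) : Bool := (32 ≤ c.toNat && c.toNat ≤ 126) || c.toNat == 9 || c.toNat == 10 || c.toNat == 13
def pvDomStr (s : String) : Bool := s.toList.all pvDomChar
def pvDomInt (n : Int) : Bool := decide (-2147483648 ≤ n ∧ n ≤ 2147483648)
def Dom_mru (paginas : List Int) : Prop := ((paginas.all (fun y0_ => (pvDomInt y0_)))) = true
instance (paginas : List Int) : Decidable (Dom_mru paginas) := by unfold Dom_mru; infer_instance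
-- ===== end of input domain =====

-- B drops the recency stack `uso`: the MRU victim is always simply the previously
-- accessed page, so a single `last` variable suffices (objective: simpler).

-- ===== PORT A =====
def quadros : Int := 8

def mruStepA : List Int × List Int × Int → Int → List Int × List Int × Int
  | (memoria, uso, faltas), p =>
    if p ∈ memoria then
      (memoria, ((PySem.List.remove? uso p).getD uso) ++ [p], faltas)
    else
      if PySem.List.len memoria < quadros then
        (memoria ++ [p], uso ++ [p], faltas + 1)
      else
        match PySem.List.pop? uso with
        -- `none`/`getD 0` branches are unreachable: uso is nonempty and mru_pag ∈ memoria here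
        | none => (memoria, uso ++ [p], faltas + 1)
        | some (mru_pag, uso') =>
          (memoria.set ((PySem.List.index? memoria mru_pag).getD 0) p, uso' ++ [p], faltas + 1)

def mru (paginas : List Int) : List Int × Int :=
  let r := paginas.foldl mruStepA ([], [], 0)
  (r.1, r.2.2)

-- ===== PORT B =====
-- B's loop as structural recursion over the remaining pages; state: frames, the
-- previously accessed page (None before the first access), and the fault count.
def mruLoop : List Int → List Int → Option Int → Int → List Int × Int
  | [], memoria, _, faltas => (memoria, faltas)
  | p :: rest, memoria, last, faltas =>
    if p ∈ memoria then
      mruLoop rest memoria (some p) faltas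
    else if PySem.List.len memoria < quadros then
      mruLoop rest (memoria ++ [p]) (some p) (faltas + 1)
    else
      match last with
      -- unreachable: a full memoria implies a previous access
      | none => mruLoop rest memoria (some p) (faltas + 1)
      | some l =>
        mruLoop rest (memoria.set ((PySem.List.index? memoria l).getD 0) p) (some p) (faltas + 1)

def mru_alt (paginas : List Int) : List Int × Int :=
  mruLoop paginas [] none 0

-- ===== PRECONDITION & SPEC =====
def Spec_mru (paginas : List Int) (out : List Int × Int) : Prop := out = mru_alt paginas
instance (paginas : List Int) (out : List Int × Int) : Decidable (Spec_mru paginas out) := by unfold Spec_mru; infer_instance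

-- ===== CLAIM (what is proved, stated in full; the proofs are below) =====
def Claim_equal_mru : Prop := ∀ (paginas : List Int), Dom_mru paginas → Spec_mru paginas (mru paginas)

-- ===== LEMMAS AND PROOFS =====

-- Coupling invariant between A's stack `uso` and B's single `last` value:
-- uso and memoria hold the same pages, both without duplicates, and uso's top is `last`.
def MruInv (memoria uso : List Int) (last : Option Int) : Prop :=
  (∀ q, q ∈ uso ↔ q ∈ memoria) ∧ uso.Nodup ∧ memoria.Nodup ∧
  (match last with
   | none => uso = []
   | some l => ∃ ys, uso = ys ++ [l])

theorem set_at_prefix_length (pre suf : List Int) (z p : Int) :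
    (pre ++ z :: suf).set pre.length p = pre ++ p :: suf := by
  induction pre with
  | nil => rfl
  | cons a t ih => simp [ih]

-- one loop iteration: A's step and B's step produce the same frames and count,
-- and the invariant is preserved with `last` updated to the current page.
theorem mru_step (memoria uso : List Int) (last : Option Int) (faltas p : Int)
    (hInv : MruInv memoria uso last) :
    ∃ mem' uso' f',
      mruStepA (memoria, uso, faltas) p = (mem', uso', f') ∧
      (∀ rest, mruLoop (p :: rest) memoria last faltas = mruLoop rest mem' (some p) f') ∧
      MruInv mem' uso' (some p) := by
  obtain ⟨hmem, hndu, hndm, hlast⟩ := hInv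
  by_cases hp : p ∈ memoria
  · -- hit
    have hpu : p ∈ uso := (hmem p).mpr hp
    refine ⟨memoria, uso.erase p ++ [p], faltas, ?_, ?_, ?_, ?_, hndm, ⟨uso.erase p, rfl⟩⟩
    · simp [mruStepA, hp, PySem.List.remove?_eq_some_erase uso p hpu]
    · intro rest; simp [mruLoop, hp]
    · intro q
      by_cases hq : q = p
      · subst hq; simp [hp]
      · simp only [List.mem_append, List.mem_singleton, hq, or_false,
          List.mem_erase_of_ne hq]
        exact hmem q
    · exact (hndu.erase p).append (List.nodup_singleton p)
        (fun a ha hb => hndu.not_mem_erase ((List.mem_singleton.mp hb) ▸ ha))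
  · by_cases hlen : PySem.List.len memoria < quadros
    · -- miss, free frame
      have hpu : p ∉ uso := fun h => hp ((hmem p).mp h)
      refine ⟨memoria ++ [p], uso ++ [p], faltas + 1, ?_, ?_, ?_, ?_, ?_, ⟨uso, rfl⟩⟩
      · simp only [mruStepA]; rw [if_neg hp, if_pos hlen]
      · intro rest; simp only [mruLoop]; rw [if_neg hp, if_pos hlen]
      · intro q; simp only [List.mem_append, List.mem_singleton]
        exact or_congr_left (hmem q)
      · exact hndu.append (List.nodup_singleton p)
          (fun a ha hb => hpu ((List.mem_singleton.mp hb) ▸ ha))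
      · exact hndm.append (List.nodup_singleton p)
          (fun a ha hb => hp ((List.mem_singleton.mp hb) ▸ ha))
    · -- miss, evict the MRU page = the previously accessed page
      have hmemne : memoria ≠ [] := by
        intro h; rw [h] at hlen; exact hlen (by decide)
      have husone : uso ≠ [] := by
        intro h
        rcases List.exists_mem_of_ne_nil memoria hmemne with ⟨x, hx⟩
        exact absurd ((hmem x).mpr hx) (by simp [h])
      obtain ⟨l, hl⟩ : ∃ l, last = some l := by
        cases last with
        | none => exact absurd hlast husone
        | some l => exact ⟨l, rfl⟩
      subst hl
      obtain ⟨ys, hys⟩ := hlast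
      subst hys
      have hlmem : l ∈ memoria := (hmem l).mp (by simp)
      have hpu : p ∉ ys ++ [l] := fun h => hp ((hmem p).mp h)
      have hpys : p ∉ ys := fun h => hpu (by simp [h])
      have hlys : l ∉ ys := by
        have := List.nodup_append.mp hndu
        exact fun h => this.2.2 l h l (List.mem_singleton.mpr rfl) rfl
      -- locate l in memoria
      obtain ⟨k, hk⟩ : ∃ k, PySem.List.index? memoria l = some k :=
        Option.isSome_iff_exists.mp ((PySem.List.index?_isSome_iff _ _).mpr hlmem)
      obtain ⟨pre, suf, hmemeq, hlenpre, hlpre⟩ := (PySem.List.index?_eq_some_iff _ _ _).mp hk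
      have hset : memoria.set ((PySem.List.index? memoria l).getD 0) p = pre ++ p :: suf := by
        rw [hk, Option.getD_some, ← hlenpre, hmemeq, set_at_prefix_length]
      have hndm' : (pre ++ l :: suf).Nodup := hmemeq ▸ hndm
      have hlsuf : l ∉ suf := (List.nodup_cons.mp (List.nodup_append.mp hndm').2.1).1
      have hppre : p ∉ pre := fun h => hp (hmemeq ▸ List.mem_append.mpr (Or.inl h))
      have hpsuf : p ∉ suf := fun h => hp (hmemeq ▸ (by simp [h]))
      refine ⟨pre ++ p :: suf, ys ++ [p], faltas + 1, ?_, ?_, ?_, ?_, ?_, ⟨ys, rfl⟩⟩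
      · simp only [mruStepA, hp, hlen, if_false, PySem.List.pop?_last ys l, hset]
      · intro rest
        simp only [mruLoop, hp, hlen, if_false]
        rw [hset]
      · intro q
        by_cases hq : q = p
        · subst hq; simp
        · have hmq := hmem q
          rw [hmemeq] at hmq
          by_cases hql : q = l
          · subst hql
            simp only [List.mem_append, List.mem_cons, List.not_mem_nil, or_false]
            constructor
            · rintro (h | h)
              · exact absurd h hlys
              · exact absurd h hq
            · rintro (h | h | h)
              · exact absurd h hlpre
              · exact absurd h hq
              · exact absurd h hlsuf
          · simp only [List.mem_append, List.mem_cons, List.not_mem_nil,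
              hq, hql, or_false, false_or] at hmq ⊢
            exact hmq
      · have hndys : ys.Nodup := (List.nodup_append.mp hndu).1
        exact hndys.append (List.nodup_singleton p)
          (fun a ha hb => hpys ((List.mem_singleton.mp hb) ▸ ha))
      · have h1 : (pre ++ suf).Nodup := (List.nodup_middle.mp hndm').of_cons
        have h2 : p ∉ pre ++ suf := by
          simp [hppre, hpsuf]
        exact List.nodup_middle.mpr (List.nodup_cons.mpr ⟨h2, h1⟩)

-- the whole loop: A's fold projected to (frames, faults) equals B's recursion
theorem mru_fold (ps : List Int) :
    ∀ (memoria uso : List Int) (last : Option Int) (faltas : Int),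
      MruInv memoria uso last →
      ((ps.foldl mruStepA (memoria, uso, faltas)).1,
       (ps.foldl mruStepA (memoria, uso, faltas)).2.2) = mruLoop ps memoria last faltas := by
  induction ps with
  | nil => intro memoria uso last faltas _; rfl
  | cons p rest ih =>
    intro memoria uso last faltas hInv
    obtain ⟨mem', uso', f', hA, hB, hInv'⟩ := mru_step memoria uso last faltas p hInv
    rw [List.foldl_cons, hA, hB rest]
    exact ih mem' uso' (some p) f' hInv'

-- ===== VERDICT (by name: the statement is the Claim_ definition above) =====
theorem mru_spec : Claim_equal_mru := by
  intro paginas _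
  unfold Spec_mru mru mru_alt
  exact mru_fold paginas [] [] none 0 ⟨fun q => Iff.rfl, List.Pairwise.nil, List.Pairwise.nil, rfl⟩
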